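-- pv_equiv track=rewrite | github.com/Gokuljokul/method_name_relevance_detector | name_relevance_detector.py | _split_name
-- ===== SOURCE A (Python) =====
-- from typing import List, Dict, Tuple, Any, Optional
--
-- def _split_name(name: str) -> List[str]:
--     """Split a name into parts based on common naming conventions."""
--     # Handle snake_case
--     if '_' in name:
--         return [part.lower() for part in name.split('_') if part]
--
--     # Handle camelCase and PascalCase
--     parts = []
--     current = ""
--     for char in name:
--         if char.isupper() and current:
--             parts.append(current.lower())
--             current = char
--         else:
--             current += char
--     if current:
--         parts.append(current.lower())
--
--     return parts
-- ===== SOURCE B (Python) =====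
-- def _split_name(name):
--     """Split a name into parts based on common naming conventions."""
--     # Handle snake_case
--     if '_' in name:
--         return [part.lower() for part in name.split('_') if part]
--
--     # Handle camelCase and PascalCase: two pointers, slice word-by-word
--     parts = []
--     i, n = 0, len(name)
--     while i < n:
--         j = i + 1
--         while j < n and not name[j].isupper():
--             j += 1
--         parts.append(name[i:j].lower())
--         i = j
--     return parts
-- ===== Notes on version B (the rewrite author's own statement) =====
-- stated objective: alternative
-- what changed: The camelCase branch no longer accumulates a word buffer character by character; B scans with two index pointers (i, j) to find the next uppercase boundary and slices whole words out of the name, lowering each slice.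
import Mathlib
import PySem

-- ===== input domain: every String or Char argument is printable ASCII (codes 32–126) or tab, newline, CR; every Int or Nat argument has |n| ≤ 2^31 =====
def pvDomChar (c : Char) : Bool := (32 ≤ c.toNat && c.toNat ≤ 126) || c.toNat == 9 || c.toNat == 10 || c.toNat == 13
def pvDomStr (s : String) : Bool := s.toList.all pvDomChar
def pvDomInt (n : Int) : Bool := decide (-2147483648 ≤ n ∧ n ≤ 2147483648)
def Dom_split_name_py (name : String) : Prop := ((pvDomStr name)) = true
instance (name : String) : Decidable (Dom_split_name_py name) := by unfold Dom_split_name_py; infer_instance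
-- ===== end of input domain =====

-- B keeps A's snake_case branch but replaces the char-accumulator camel loop by a
-- two-pointer scan that slices whole words (objective: alternative decomposition).

-- ===== PORT A =====
-- the camelCase loop of A: state (parts, current), one character at a time
def pvLoopA : List Char → List (List Char) → List Char → List (List Char)
  | [], parts, current =>
      if !current.isEmpty then parts ++ [PySem.Chars.lower current] else parts
  | c :: cs, parts, current =>
      if PySem.Chars.isupper c && !current.isEmpty then
        pvLoopA cs (parts ++ [PySem.Chars.lower current]) [c]
      else
        pvLoopA cs parts (current ++ [c])

def split_name_py (name : String) : List String :=
  if PySem.Str.isIn "_" name then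
    ((PySem.Chars.splitOn name.toList ['_']).filter (fun p => !p.isEmpty)).map
      (fun p => String.ofList (PySem.Chars.lower p))
  else
    (pvLoopA name.toList [] []).map String.ofList

-- ===== PORT B =====
-- inner while of Source B: advance j while j < n and not name[j].isupper()
def pvScanB (cs : List Char) (j : Nat) : Nat :=
  if h : j < cs.length then
    if ¬ PySem.Chars.isupper cs[j] then pvScanB cs (j + 1) else j
  else j
termination_by cs.length - j

-- needed by pvLoopB's termination proof (cited in its decreasing_by)
theorem le_pvScanB (cs : List Char) (j : Nat) : j ≤ pvScanB cs j := by
  unfold pvScanB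
  split
  · split
    · exact Nat.le_of_succ_le (le_pvScanB cs (j + 1))
    · exact Nat.le_refl j
  · exact Nat.le_refl j
termination_by cs.length - j

-- outer while of Source B; name[i:j] with 0 ≤ i ≤ j is exactly (drop i).take (j - i)
def pvLoopB (cs : List Char) (i : Nat) (parts : List (List Char)) : List (List Char) :=
  if _h : i < cs.length then
    let j := pvScanB cs (i + 1)
    pvLoopB cs j (parts ++ [PySem.Chars.lower ((cs.drop i).take (j - i))])
  else parts
termination_by cs.length - i
decreasing_by
  have := le_pvScanB cs (i + 1)
  omega

def split_name_py_alt (name : String) : List String :=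
  if PySem.Str.isIn "_" name then
    ((PySem.Chars.splitOn name.toList ['_']).filter (fun p => !p.isEmpty)).map
      (fun p => String.ofList (PySem.Chars.lower p))
  else
    (pvLoopB name.toList 0 []).map String.ofList

-- ===== PRECONDITION & SPEC =====
def Spec_split_name_py (name : String) (out : List String) : Prop := out = split_name_py_alt name
instance (name : String) (out : List String) : Decidable (Spec_split_name_py name out) := by unfold Spec_split_name_py; infer_instance

-- ===== CLAIM (what is proved, stated in full; the proofs are below) =====
def Claim_equal_split_name_py : Prop := ∀ (name : String), Dom_split_name_py name → Spec_split_name_py name (split_name_py name)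

-- ===== LEMMAS AND PROOFS =====
-- the common value of both camel loops: word = head plus following non-uppers
def pvP (c : Char) : Bool := !PySem.Chars.isupper c

def pvSplitC : List Char → List (List Char)
  | [] => []
  | c :: cs =>
      PySem.Chars.lower (c :: cs.takeWhile pvP) :: pvSplitC (cs.dropWhile pvP)
termination_by cs => cs.length
decreasing_by
  simp only [List.length_cons]
  exact Nat.lt_succ_of_le (List.length_dropWhile_le pvP cs)

theorem pvTake_len_takeWhile {α : Type} (p : α → Bool) (l : List α) :
    l.take (l.takeWhile p).length = l.takeWhile p := by
  induction l with
  | nil => rfl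
  | cons a l ih =>
    by_cases h : p a = true
    · simp [h, ih]
    · simp [h]

theorem pvDrop_len_takeWhile {α : Type} (p : α → Bool) (l : List α) :
    l.drop (l.takeWhile p).length = l.dropWhile p := by
  induction l with
  | nil => rfl
  | cons a l ih =>
    by_cases h : p a = true
    · simp [h, ih]
    · simp [h]

theorem pvLoopA_spec (cs : List Char) (parts : List (List Char)) (cur : List Char)
    (hcur : cur ≠ []) :
    pvLoopA cs parts cur =
      parts ++ PySem.Chars.lower (cur ++ cs.takeWhile pvP) :: pvSplitC (cs.dropWhile pvP) := by
  induction cs generalizing parts cur with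
  | nil =>
    simp [pvLoopA, hcur, pvSplitC]
  | cons c cs ih =>
    by_cases hc : PySem.Chars.isupper c = true
    · have : pvLoopA (c :: cs) parts cur = pvLoopA cs (parts ++ [PySem.Chars.lower cur]) [c] := by
        simp [pvLoopA, hc, hcur]
      rw [this, ih _ [c] (by simp)]
      have hp : pvP c = false := by simp [pvP, hc]
      simp [hp, pvSplitC]
    · have : pvLoopA (c :: cs) parts cur = pvLoopA cs parts (cur ++ [c]) := by
        simp [pvLoopA, hc]
      rw [this, ih _ (cur ++ [c]) (by simp)]
      have hp : pvP c = true := by simp [pvP, hc]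
      simp [hp]

theorem pvLoopA_eq_splitC (cs : List Char) : pvLoopA cs [] [] = pvSplitC cs := by
  cases cs with
  | nil => simp [pvLoopA, pvSplitC]
  | cons c cs =>
    have : pvLoopA (c :: cs) [] [] = pvLoopA cs [] [c] := by
      simp [pvLoopA]
    rw [this, pvLoopA_spec cs [] [c] (by simp)]
    simp [pvSplitC]

theorem pvScanB_spec (cs : List Char) (j : Nat) :
    pvScanB cs j = j + ((cs.drop j).takeWhile pvP).length := by
  unfold pvScanB
  split
  · rename_i hj
    split
    · rename_i hu
      have hp : pvP cs[j] = true := by simp [pvP, hu]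
      have hw : (cs.drop j).takeWhile pvP = cs[j] :: (cs.drop (j + 1)).takeWhile pvP := by
        rw [List.drop_eq_getElem_cons hj, List.takeWhile_cons_of_pos hp]
      rw [pvScanB_spec cs (j + 1), hw]
      simp
      omega
    · rename_i hu
      have hp : pvP cs[j] = false := by simp [pvP, not_not.mp hu]
      have hw : (cs.drop j).takeWhile pvP = [] := by
        rw [List.drop_eq_getElem_cons hj, List.takeWhile_cons_of_neg (by simp [hp])]
      rw [hw]
      simp
  · rename_i hj
    rw [List.drop_eq_nil_of_le (by omega)]
    simp
termination_by cs.length - j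

theorem pvLoopB_spec (cs : List Char) (i : Nat) (parts : List (List Char)) :
    pvLoopB cs i parts = parts ++ pvSplitC (cs.drop i) := by
  unfold pvLoopB
  split
  · rename_i h
    have hscan := pvScanB_spec cs (i + 1)
    have hle := le_pvScanB cs (i + 1)
    rw [pvLoopB_spec cs (pvScanB cs (i + 1)) _]
    have hdropi : cs.drop i = cs[i] :: cs.drop (i + 1) := List.drop_eq_getElem_cons h
    set t := ((cs.drop (i + 1)).takeWhile pvP).length with ht
    have htake : (cs.drop i).take (pvScanB cs (i + 1) - i) =
        cs[i] :: (cs.drop (i + 1)).takeWhile pvP := by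
      rw [hdropi]
      have h1 : pvScanB cs (i + 1) - i = t + 1 := by omega
      rw [h1, List.take_succ_cons]
      congr 1
      exact pvTake_len_takeWhile pvP (cs.drop (i + 1))
    have hdropj : cs.drop (pvScanB cs (i + 1)) = (cs.drop (i + 1)).dropWhile pvP := by
      have h2 : pvScanB cs (i + 1) = (i + 1) + t := by omega
      rw [h2, ← List.drop_drop, pvDrop_len_takeWhile]
    rw [htake, hdropj]
    conv_rhs => rw [hdropi, pvSplitC]
    simp
  · rename_i h
    rw [List.drop_eq_nil_of_le (by omega)]
    simp [pvSplitC]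
termination_by cs.length - i
decreasing_by
  have := le_pvScanB cs (i + 1)
  omega

-- ===== VERDICT (by name: the statement is the Claim_ definition above) =====
theorem split_name_py_spec : Claim_equal_split_name_py := by
  intro name _
  unfold Spec_split_name_py split_name_py split_name_py_alt
  split
  · rfl
  · rw [pvLoopA_eq_splitC, pvLoopB_spec]
    simp
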